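-- pv_equiv track=rewrite | github.com/iliaaz/study_problems | ch17_hard.py | kthmultiple
-- ===== SOURCE A (Python) =====
-- def kthmultiple(k):
--     if k == 0:
--         return 1
--     candidates = {}
--     candidates[3] = [3]
--     candidates[5] = [5]
--     candidates[7] = [7]
--
--     index = 0
--     while index < k:
--         minvalue = min(candidates[3][0], candidates[5][0], candidates[7][0])
--         if candidates[3][0] == minvalue:
--             candidates[3] = candidates[3][1:]
--             candidates[3].append(minvalue * 3)
--             candidates[5].append(minvalue * 5)
--             candidates[7].append(minvalue * 7)
--         if candidates[5][0] == minvalue: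
--             candidates[5] = candidates[5][1:]
--             candidates[5].append(minvalue * 5)
--             candidates[7].append(minvalue * 7)
--         if candidates[7][0] == minvalue:
--             candidates[7] = candidates[7][1:]
--             candidates[7].append(minvalue * 7)
--
--         index += 1
--
--     return minvalue
-- ===== SOURCE B (Python) =====
-- def kthmultiple(k):
--     # three-pointer dynamic programming over the growing list of produced values
--     u = [1]
--     i3 = i5 = i7 = 0
--     for _ in range(k):
--         m = min(3 * u[i3], 5 * u[i5], 7 * u[i7])
--         if 3 * u[i3] == m:
--             i3 += 1
--         if 5 * u[i5] == m:
--             i5 += 1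
--         if 7 * u[i7] == m:
--             i7 += 1
--         u.append(m)
--     return u[-1]
-- ===== Notes on version B (the rewrite author's own statement) =====
-- stated objective: faster
-- what changed: replaces the three slice-and-rebuild queues with a single growing list of produced values and three index pointers, each advanced past the minimum of 3*u[i3], 5*u[i5], 7*u[i7] (classic three-pointer DP)
import Mathlib
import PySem

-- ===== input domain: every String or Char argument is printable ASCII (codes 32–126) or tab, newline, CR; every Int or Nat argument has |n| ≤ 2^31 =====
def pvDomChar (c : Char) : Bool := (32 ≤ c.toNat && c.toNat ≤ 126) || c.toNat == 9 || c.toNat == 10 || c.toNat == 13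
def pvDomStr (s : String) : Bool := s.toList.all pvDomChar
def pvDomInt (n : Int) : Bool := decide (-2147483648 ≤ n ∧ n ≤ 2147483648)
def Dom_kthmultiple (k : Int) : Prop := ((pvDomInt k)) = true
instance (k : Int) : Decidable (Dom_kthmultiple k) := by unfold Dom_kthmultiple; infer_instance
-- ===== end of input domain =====

-- B replaces A's three slice-and-rebuild queues by one growing list with three index
-- pointers (three-pointer DP); measured asymptotically faster (A copies a queue per step).

-- ===== PORT A =====
-- one loop iteration of A; the queues are provably nonempty throughout, so the
-- default 0 of headD (Python q[0], IndexError on empty) is never used on reachable states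
def stepA : List Int × List Int × List Int → (List Int × List Int × List Int) × Int :=
  fun (q3, q5, q7) =>
    let m := min (min (q3.headD 0) (q5.headD 0)) (q7.headD 0)
    let s1 : List Int × List Int × List Int :=
      if q3.headD 0 = m then (q3.drop 1 ++ [m * 3], q5 ++ [m * 5], q7 ++ [m * 7])
      else (q3, q5, q7)
    let s2 : List Int × List Int :=
      if s1.2.1.headD 0 = m then (s1.2.1.drop 1 ++ [m * 5], s1.2.2 ++ [m * 7])
      else (s1.2.1, s1.2.2)
    let q7' : List Int := if s2.2.headD 0 = m then s2.2.drop 1 ++ [m * 7] else s2.2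
    ((s1.1, s2.1, q7'), m)

-- while index < k: … ; the carried Int is the last minvalue (0 before the first iteration)
def loopA : Nat → (List Int × List Int × List Int) → Int → Int
  | 0, _, m => m
  | n + 1, s, _ => loopA n (stepA s).1 (stepA s).2

def kthmultiple (k : Int) : Int :=
  if k = 0 then 1 else loopA k.toNat ([3], [5], [7]) 0

-- ===== PORT B =====
-- one loop iteration of B: indices are Python ints; they are provably in range,
-- so pyGetD's default 0 (Python u[i], IndexError out of range) is never used
def stepB : List Int × Int × Int × Int → List Int × Int × Int × Int :=
  fun (u, i3, i5, i7) =>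
    let m := min (min (3 * PySem.List.pyGetD u i3 0) (5 * PySem.List.pyGetD u i5 0))
              (7 * PySem.List.pyGetD u i7 0)
    let i3' := if 3 * PySem.List.pyGetD u i3 0 = m then i3 + 1 else i3
    let i5' := if 5 * PySem.List.pyGetD u i5 0 = m then i5 + 1 else i5
    let i7' := if 7 * PySem.List.pyGetD u i7 0 = m then i7 + 1 else i7
    (u ++ [m], i3', i5', i7')

def loopB : Nat → List Int × Int × Int × Int → List Int × Int × Int × Int
  | 0, s => s
  | n + 1, s => loopB n (stepB s)

def kthmultiple_alt (k : Int) : Int :=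
  PySem.List.pyGetD (loopB k.toNat ([1], 0, 0, 0)).1 (-1) 0   -- u[-1]; u is never empty

-- ===== PRECONDITION & SPEC =====
-- A raises (UnboundLocalError: minvalue unset) for k < 0; those inputs are excluded.
def Pre_kthmultiple (k : Int) : Prop := 0 ≤ k
instance (k : Int) : Decidable (Pre_kthmultiple k) := by unfold Pre_kthmultiple; infer_instance
def pvWitness_kthmultiple : Int := (5)

def Spec_kthmultiple (k : Int) (out : Int) : Prop := out = kthmultiple_alt k
instance (k : Int) (out : Int) : Decidable (Spec_kthmultiple k out) := by unfold Spec_kthmultiple; infer_instance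

-- ===== CLAIM (what is proved, stated in full; the proofs are below) =====
def Claim_equal_kthmultiple : Prop := ∀ (k : Int), Dom_kthmultiple k → Pre_kthmultiple k → Spec_kthmultiple k (kthmultiple k)

-- ===== LEMMAS AND PROOFS =====

-- x is a 3-5-7-smooth number (product of powers of 3, 5, 7); all values both programs handle
def Smooth (x : Int) : Prop := ∃ a b c : ℕ, x = 3 ^ a * 5 ^ b * 7 ^ c

-- the queue predicates: A's queue q_p holds p*y for exactly the y ∈ u with R_p y and p*y > L
def R3 : Int → Bool := fun y => decide (¬ (5:Int) ∣ y) && decide (¬ (7:Int) ∣ y)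
def R5 : Int → Bool := fun y => decide (¬ (7:Int) ∣ y)
def R7 : Int → Bool := fun _ => true
def Q3 (L : Int) : Int → Bool := fun y => R3 y && decide (L < 3 * y)
def Q5 (L : Int) : Int → Bool := fun y => R5 y && decide (L < 5 * y)
def Q7 (L : Int) : Int → Bool := fun y => R7 y && decide (L < 7 * y)

-- the coupled invariant: u is the sorted list of all smooth numbers ≤ L (its last element),
-- a3/a5/a7 are B's pointers, and A's queues are determined by u and L
structure SInv (u : List Int) (L : Int) (a3 a5 a7 : ℕ) (q3 q5 q7 : List Int) : Prop where
  sorted : u.Pairwise (· < ·)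
  one_mem : (1:Int) ∈ u
  smooth : ∀ y ∈ u, Smooth y
  last : u.getLast? = some L
  complete : ∀ x : Int, Smooth x → x ≤ L → x ∈ u
  lt3 : a3 < u.length
  lt5 : a5 < u.length
  lt7 : a7 < u.length
  lo3 : ∀ j (hj : j < u.length), j < a3 → 3 * u[j] ≤ L
  lo5 : ∀ j (hj : j < u.length), j < a5 → 5 * u[j] ≤ L
  lo7 : ∀ j (hj : j < u.length), j < a7 → 7 * u[j] ≤ L
  hi3 : L < 3 * u[a3]'lt3
  hi5 : L < 5 * u[a5]'lt5
  hi7 : L < 7 * u[a7]'lt7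
  q3eq : q3 = (u.filter (Q3 L)).map (3 * ·)
  q5eq : q5 = (u.filter (Q5 L)).map (5 * ·)
  q7eq : q7 = (u.filter (Q7 L)).map (7 * ·)


theorem prime5 : Prime (5:ℤ) := by norm_num
theorem prime7 : Prime (7:ℤ) := by norm_num

theorem smooth_mul3 {y : Int} (h : Smooth y) : Smooth (3 * y) := by
  obtain ⟨a, b, c, rfl⟩ := h; exact ⟨a + 1, b, c, by ring⟩
theorem smooth_mul5 {y : Int} (h : Smooth y) : Smooth (5 * y) := by
  obtain ⟨a, b, c, rfl⟩ := h; exact ⟨a, b + 1, c, by ring⟩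
theorem smooth_mul7 {y : Int} (h : Smooth y) : Smooth (7 * y) := by
  obtain ⟨a, b, c, rfl⟩ := h; exact ⟨a, b, c + 1, by ring⟩

theorem smooth_factor {x : Int} (h : Smooth x) (hx : x ≠ 1) :
    ∃ y, Smooth y ∧ (x = 3 * y ∨ x = 5 * y ∨ x = 7 * y) := by
  obtain ⟨a, b, c, rfl⟩ := h
  match a, b, c with
  | 0, 0, 0 => exact absurd (by norm_num) hx
  | a + 1, b, c => exact ⟨3 ^ a * 5 ^ b * 7 ^ c, ⟨a, b, c, rfl⟩, Or.inl (by ring)⟩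
  | 0, b + 1, c => exact ⟨3 ^ 0 * 5 ^ b * 7 ^ c, ⟨0, b, c, rfl⟩, Or.inr (Or.inl (by ring))⟩
  | 0, 0, c + 1 => exact ⟨3 ^ 0 * 5 ^ 0 * 7 ^ c, ⟨0, 0, c, rfl⟩, Or.inr (Or.inr (by ring))⟩

theorem seven_not_dvd {a b : ℕ} : ¬ (7:ℤ) ∣ 3 ^ a * 5 ^ b := by
  intro hd
  rcases prime7.dvd_mul.mp hd with h | h
  · have := prime7.dvd_of_dvd_pow h; norm_num at this
  · have := prime7.dvd_of_dvd_pow h; norm_num at this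

theorem five_not_dvd {a c : ℕ} : ¬ (5:ℤ) ∣ 3 ^ a * 7 ^ c := by
  intro hd
  rcases prime5.dvd_mul.mp hd with h | h
  · have := prime5.dvd_of_dvd_pow h; norm_num at this
  · have := prime5.dvd_of_dvd_pow h; norm_num at this

theorem smooth_div7 {x : Int} (h : Smooth x) (hd : (7:ℤ) ∣ x) : ∃ y, Smooth y ∧ x = 7 * y := by
  obtain ⟨a, b, c, rfl⟩ := h
  match c with
  | 0 => exact absurd (by simpa using hd) seven_not_dvd
  | c + 1 => exact ⟨3 ^ a * 5 ^ b * 7 ^ c, ⟨a, b, c, rfl⟩, by ring⟩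

theorem smooth_div5 {x : Int} (h : Smooth x) (hd : (5:ℤ) ∣ x) : ∃ y, Smooth y ∧ x = 5 * y := by
  obtain ⟨a, b, c, rfl⟩ := h
  match b with
  | 0 =>
    exact absurd (by have := hd; ring_nf at this ⊢; simpa [mul_comm, mul_assoc] using this)
      (five_not_dvd (a := a) (c := c))
  | b + 1 => exact ⟨3 ^ a * 5 ^ b * 7 ^ c, ⟨a, b, c, rfl⟩, by ring⟩

theorem smooth_one_le {x : Int} (h : Smooth x) : 1 ≤ x := by
  obtain ⟨a, b, c, rfl⟩ := h
  have h3 : (1:ℤ) ≤ 3 ^ a := one_le_pow₀ (by norm_num)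
  have h5 : (1:ℤ) ≤ 5 ^ b := one_le_pow₀ (by norm_num)
  have h7 : (1:ℤ) ≤ 7 ^ c := one_le_pow₀ (by norm_num)
  calc (1:ℤ) = 1 * 1 * 1 := by ring
    _ ≤ 3 ^ a * 5 ^ b * 7 ^ c := by
        apply mul_le_mul (mul_le_mul h3 h5 (by norm_num) (by positivity)) h7 (by norm_num) (by positivity)

theorem mem_le_last {u : List Int} {L y : Int} (hs : u.Pairwise (· < ·))
    (hl : u.getLast? = some L) (hy : y ∈ u) : y ≤ L := by
  obtain ⟨pre, rfl⟩ := List.getLast?_eq_some_iff.mp hl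
  rw [List.pairwise_append] at hs
  rcases List.mem_append.mp hy with h | h
  · exact le_of_lt (hs.2.2 y h L (by simp))
  · simp at h; omega

theorem mem_lt_ptr {u : List Int} {a : ℕ} {y : Int} (hs : u.Pairwise (· < ·))
    (ha : a < u.length) (hy : y ∈ u) (hlt : y < u[a]'ha) :
    ∃ j, ∃ hj : j < u.length, j < a ∧ u[j] = y := by
  obtain ⟨j, hj, rfl⟩ := List.mem_iff_getElem.mp hy
  refine ⟨j, hj, ?_, rfl⟩
  rcases Nat.lt_trichotomy j a with h | h | h
  · exact h
  · exact absurd hlt (by subst h; exact lt_irrefl _)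
  · exact absurd (List.pairwise_iff_getElem.mp hs a j ha hj h)
      (fun hh => absurd (lt_trans hh hlt) (lt_irrefl _))

theorem filter_head {u : List Int} {P : Int → Bool} {f : Int} {rest : List Int}
    (hs : u.Pairwise (· < ·)) (hF : u.filter P = f :: rest) :
    f ∈ u ∧ P f = true ∧ ∀ y ∈ u, P y = true → f ≤ y := by
  have hfm : f ∈ u.filter P := by rw [hF]; exact List.mem_cons_self ..
  have hps : (u.filter P).Pairwise (· < ·) := hs.filter P
  obtain ⟨hfu, hfP⟩ := List.mem_filter.mp hfm
  refine ⟨hfu, hfP, fun y hy hPy => ?_⟩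
  have : y ∈ u.filter P := List.mem_filter.mpr ⟨hy, hPy⟩
  rw [hF] at this hps
  rcases this with _ | hyr
  · exact le_refl _
  · exact le_of_lt ((List.pairwise_cons.mp hps).1 y (by assumption))

theorem filter_gt {F : List Int} (hs : F.Pairwise (· < ·)) (c m : Int) (hc : 0 < c)
    {f : Int} {rest : List Int} (hF : F = f :: rest) (hge : m ≤ c * f) :
    F.filter (fun y => decide (m < c * y)) = if c * f = m then rest else F := by
  subst hF
  have hd : ∀ y ∈ rest, f < y := (List.pairwise_cons.mp hs).1
  by_cases he : c * f = m
  · rw [if_pos he]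
    have h1 : (decide (m < c * f)) = false := by simp [he]
    rw [List.filter_cons, h1]
    simp only [Bool.false_eq_true, if_false]
    exact List.filter_eq_self.mpr fun y hy => by
      have h2 : c * f < c * y := mul_lt_mul_of_pos_left (hd y hy) hc
      simp only [decide_eq_true_eq]
      exact he ▸ h2
  · rw [if_neg he]
    have hgt : m < c * f := lt_of_le_of_ne hge fun h => he h.symm
    rw [List.filter_cons]
    simp only [hgt, decide_true, if_true]
    congr 1
    exact List.filter_eq_self.mpr fun y hy => by
      have h2 : c * f < c * y := mul_lt_mul_of_pos_left (hd y hy) hc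
      simp only [decide_eq_true_eq]
      exact lt_trans hgt h2

theorem exists_max_filtered {u : List Int} (hs : u.Pairwise (· < ·)) (P : Int → Bool)
    {w : Int} (hw : w ∈ u) (hPw : P w = true) :
    ∃ y, y ∈ u ∧ P y = true ∧ ∀ z ∈ u, P z = true → z ≤ y := by
  have hne : u.filter P ≠ [] := by
    intro h
    have : w ∈ u.filter P := List.mem_filter.mpr ⟨hw, hPw⟩
    rw [h] at this; simp at this
  set y := (u.filter P).getLast hne with hy
  have hym : y ∈ u.filter P := List.getLast_mem hne
  obtain ⟨hyu, hyP⟩ := List.mem_filter.mp hym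
  refine ⟨y, hyu, hyP, fun z hz hPz => ?_⟩
  exact mem_le_last (hs.filter P) (List.getLast?_eq_some_getLast hne ▸ rfl) (List.mem_filter.mpr ⟨hz, hPz⟩)


theorem queue_step {u : List Int} {L m p : Int} (hs : u.Pairwise (· < ·)) (hp : 0 < p)
    (hLm : L < m) (R : Int → Bool) {f : Int} {rest : List Int}
    (hF : u.filter (fun y => R y && decide (L < p * y)) = f :: rest)
    (hge : m ≤ p * f) :
    (u ++ [m]).filter (fun y => R y && decide (m < p * y)) =
      (if p * f = m then rest else u.filter (fun y => R y && decide (L < p * y))) ++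
      (if R m && decide (m < p * m) then [m] else []) := by
  rw [List.filter_append]
  congr 1
  · have h1 : ∀ y ∈ u, (R y && decide (m < p * y)) = (decide (m < p * y) && (R y && decide (L < p * y))) := by
      intro y _
      by_cases h : m < p * y
      · simp only [h, decide_true, Bool.true_and, Bool.and_true]
        simp [lt_trans hLm h]
      · simp [h]
    rw [List.filter_congr h1, ← List.filter_filter]
    exact filter_gt (hs.filter _) p m hp hF hge
  · cases h : R m && decide (m < p * m) <;> simp [List.filter, h]

theorem ptr_step (u : List Int) (L m p : Int) (a : ℕ) (hs : u.Pairwise (· < ·)) (hp : 1 < p)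
    (lt_ : a < u.length) (lo : ∀ j (hj : j < u.length), j < a → p * u[j] ≤ L)
    (hLm : L < m) (hm1 : 1 ≤ m) (hge : m ≤ p * u[a]'lt_) (b : ℕ)
    (hbe : b = if p * u[a]'lt_ = m then a + 1 else a) :
    (b < (u ++ [m]).length) ∧
    (∀ j (hj : j < (u ++ [m]).length), j < b → p * (u ++ [m])[j] ≤ m) ∧
    (∀ hb : b < (u ++ [m]).length, m < p * (u ++ [m])[b]'hb) := by
  have hlen : (u ++ [m]).length = u.length + 1 := by simp
  by_cases hc : p * u[a]'lt_ = m
  · rw [if_pos hc] at hbe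
    subst hbe
    refine ⟨by omega, ?_, ?_⟩
    · intro j hj hjb
      have hju : j < u.length := by omega
      rw [List.getElem_append_left hju]
      rcases Nat.lt_or_ge j a with h | h
      · exact le_trans (lo j hju h) (le_of_lt hLm)
      · have : j = a := by omega
        subst this; omega
    · intro hb
      rcases Nat.lt_or_ge (a + 1) u.length with h | h
      · rw [List.getElem_append_left h]
        have h1 : u[a]'lt_ < u[a+1]'h := List.pairwise_iff_getElem.mp hs a (a+1) lt_ h (by omega)
        have := mul_lt_mul_of_pos_left h1 (lt_trans one_pos hp)
        omega
      · have he : a + 1 = u.length := by omega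
        have hgm : (u ++ [m])[a+1]'hb = m := by
          rw [List.getElem_append_right (by omega)]
          simp [he]
        rw [hgm]
        have := mul_lt_mul_of_pos_right hp (lt_of_lt_of_le one_pos hm1)
        omega
  · rw [if_neg hc] at hbe
    subst hbe
    refine ⟨by omega, ?_, ?_⟩
    · intro j hj hjb
      have hju : j < u.length := by omega
      rw [List.getElem_append_left hju]
      exact le_trans (lo j hju (by omega)) (le_of_lt hLm)
    · intro hb
      rw [List.getElem_append_left lt_]
      omega

theorem ptr_le_first {u : List Int} {L p f : Int} {a : ℕ} (hs : u.Pairwise (· < ·))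
    (ha : a < u.length) (lo : ∀ j (hj : j < u.length), j < a → p * u[j] ≤ L)
    (hf : f ∈ u) (hQf : L < p * f) : u[a]'ha ≤ f := by
  by_contra hcon
  push Not at hcon
  obtain ⟨j, hj, hja, hje⟩ := mem_lt_ptr hs ha hf hcon
  have := lo j hj hja
  rw [hje] at this
  omega

theorem no_smooth_between {u : List Int} {L m p x y : Int} {a : ℕ} (hs : u.Pairwise (· < ·))
    (hlast : u.getLast? = some L) (hcomp : ∀ z : Int, Smooth z → z ≤ L → z ∈ u) (hp : 0 < p)
    (lt_ : a < u.length) (lo : ∀ j (hj : j < u.length), j < a → p * u[j] ≤ L)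
    (hge : m ≤ p * u[a]'lt_) (hys : Smooth y) (hxy : x = p * y) (hLx : L < x) (hxm : x ≤ m) :
    x = m := by
  have hxpL : u[a]'lt_ ≤ L := mem_le_last hs hlast (List.getElem_mem lt_)
  have hyxp : y ≤ u[a]'lt_ := by
    have h1 : p * y ≤ p * u[a]'lt_ := by omega
    exact le_of_mul_le_mul_left h1 hp
  have hyu : y ∈ u := hcomp y hys (le_trans hyxp hxpL)
  rcases lt_or_ge y (u[a]'lt_) with hlt | hge2
  · obtain ⟨j, hj, hja, hje⟩ := mem_lt_ptr hs lt_ hyu hlt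
    have := lo j hj hja
    rw [hje] at this
    omega
  · have : p * u[a]'lt_ ≤ p * y := mul_le_mul_of_nonneg_left hge2 (le_of_lt hp)
    omega

theorem step_bisim (u : List Int) (L : Int) (a3 a5 a7 : ℕ) (q3 q5 q7 : List Int)
    (h : SInv u L a3 a5 a7 q3 q5 q7) :
    ∃ (m : Int) (b3 b5 b7 : ℕ) (r3 r5 r7 : List Int),
      stepB (u, (a3 : Int), (a5 : Int), (a7 : Int)) = (u ++ [m], (b3 : Int), (b5 : Int), (b7 : Int)) ∧
      stepA (q3, q5, q7) = ((r3, r5, r7), m) ∧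
      SInv (u ++ [m]) m b3 b5 b7 r3 r5 r7 := by
  obtain ⟨hs, h1m, hsm, hlast, hcomp, lt3, lt5, lt7, lo3, lo5, lo7, hi3, hi5, hi7, hq3, hq5, hq7⟩ := h
  have hL1 : (1:ℤ) ≤ L := mem_le_last hs hlast h1m
  have hx3m : u[a3]'lt3 ∈ u := List.getElem_mem lt3
  have hx5m : u[a5]'lt5 ∈ u := List.getElem_mem lt5
  have hx7m : u[a7]'lt7 ∈ u := List.getElem_mem lt7
  -- the three queues are nonempty
  have hQ7x7 : Q7 L (u[a7]'lt7) = true := by simp [Q7, R7]; exact hi7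
  have hne7 : u.filter (Q7 L) ≠ [] := by
    intro hnil
    have := List.mem_filter.mpr ⟨hx7m, hQ7x7⟩
    rw [hnil] at this; simp at this
  obtain ⟨f7, r7, hF7⟩ := List.exists_cons_of_ne_nil hne7
  have hR3one : R3 (1:ℤ) = true := by norm_num [R3]
  have hne3 : u.filter (Q3 L) ≠ [] := by
    obtain ⟨y, hyu, hyP, hymax⟩ := exists_max_filtered hs R3 h1m hR3one
    have hy1 : 1 ≤ y := smooth_one_le (hsm y hyu)
    simp only [R3, Bool.and_eq_true, decide_eq_true_eq] at hyP
    have hQy : Q3 L y = true := by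
      simp only [Q3, R3, Bool.and_eq_true, decide_eq_true_eq]
      refine ⟨⟨hyP.1, hyP.2⟩, ?_⟩
      by_contra hcon
      push Not at hcon
      have h3s : Smooth (3*y) := smooth_mul3 (hsm y hyu)
      have h3u : 3*y ∈ u := hcomp _ h3s hcon
      have hR : R3 (3*y) = true := by
        simp only [R3, Bool.and_eq_true, decide_eq_true_eq]
        constructor
        · intro hd
          rcases prime5.dvd_mul.mp hd with hh | hh
          · norm_num at hh
          · exact hyP.1 hh
        · intro hd
          rcases prime7.dvd_mul.mp hd with hh | hh
          · norm_num at hh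
          · exact hyP.2 hh
      have := hymax _ h3u hR
      omega
    intro hnil
    have := List.mem_filter.mpr ⟨hyu, hQy⟩
    rw [hnil] at this; simp at this
  obtain ⟨f3, r3, hF3⟩ := List.exists_cons_of_ne_nil hne3
  have hne5 : u.filter (Q5 L) ≠ [] := by
    obtain ⟨y, hyu, hyP, hymax⟩ := exists_max_filtered hs R5 h1m (by norm_num [R5])
    have hy1 : 1 ≤ y := smooth_one_le (hsm y hyu)
    simp only [R5, decide_eq_true_eq] at hyP
    have hQy : Q5 L y = true := by
      simp only [Q5, R5, Bool.and_eq_true, decide_eq_true_eq]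
      refine ⟨hyP, ?_⟩
      by_contra hcon
      push Not at hcon
      have h5s : Smooth (5*y) := smooth_mul5 (hsm y hyu)
      have h5u : 5*y ∈ u := hcomp _ h5s hcon
      have hR : R5 (5*y) = true := by
        simp only [R5, decide_eq_true_eq]
        intro hd
        rcases prime7.dvd_mul.mp hd with hh | hh
        · norm_num at hh
        · exact hyP hh
      have := hymax _ h5u hR
      omega
    intro hnil
    have := List.mem_filter.mpr ⟨hyu, hQy⟩
    rw [hnil] at this; simp at this
  obtain ⟨f5, r5, hF5⟩ := List.exists_cons_of_ne_nil hne5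
  -- head facts
  obtain ⟨hf3u, hf3Q, hf3min⟩ := filter_head hs hF3
  obtain ⟨hf5u, hf5Q, hf5min⟩ := filter_head hs hF5
  obtain ⟨hf7u, hf7Q, hf7min⟩ := filter_head hs hF7
  simp only [Q3, R3, Bool.and_eq_true, decide_eq_true_eq] at hf3Q
  simp only [Q5, R5, Bool.and_eq_true, decide_eq_true_eq] at hf5Q
  simp only [Q7, R7, Bool.true_and, decide_eq_true_eq] at hf7Q
  -- pointer values are below the heads
  have hxf3 : u[a3]'lt3 ≤ f3 := ptr_le_first hs lt3 lo3 hf3u hf3Q.2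
  have hxf5 : u[a5]'lt5 ≤ f5 := ptr_le_first hs lt5 lo5 hf5u hf5Q.2
  have hxf7 : u[a7]'lt7 ≤ f7 := ptr_le_first hs lt7 lo7 hf7u hf7Q
  have hf7x : f7 ≤ u[a7]'lt7 := hf7min _ hx7m hQ7x7
  set m := min (min (3 * u[a3]'lt3) (5 * u[a5]'lt5)) (7 * u[a7]'lt7) with hmdef
  have hm3 : m ≤ 3 * u[a3]'lt3 := le_trans (min_le_left _ _) (min_le_left _ _)
  have hm5 : m ≤ 5 * u[a5]'lt5 := le_trans (min_le_left _ _) (min_le_right _ _)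
  have hm7 : m ≤ 7 * u[a7]'lt7 := min_le_right _ _
  have hmf3 : m ≤ 3 * f3 := le_trans hm3 (by omega)
  have hmf5 : m ≤ 5 * f5 := le_trans hm5 (by omega)
  have hmf7 : m ≤ 7 * f7 := le_trans hm7 (by omega)
  have hLm : L < m := lt_min (lt_min hi3 hi5) hi7
  have hm1 : 1 ≤ m := by omega
  -- the minimum over A's heads is not larger than any of B's three candidates
  have hA3 : min (min (3*f3) (5*f5)) (7*f7) ≤ 3 * u[a3]'lt3 := by
    by_cases d7 : (7:ℤ) ∣ u[a3]'lt3
    · obtain ⟨w, hws, hxw⟩ := smooth_div7 (hsm _ hx3m) d7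
      have hw1 : 1 ≤ w := smooth_one_le hws
      have hzL : 3*w ≤ L := le_trans (by omega) (mem_le_last hs hlast hx3m)
      have hzu : 3*w ∈ u := hcomp _ (smooth_mul3 hws) hzL
      have hQ : Q7 L (3*w) = true := by
        simp only [Q7, R7, Bool.true_and, decide_eq_true_eq]; omega
      have hle := hf7min _ hzu hQ
      calc min (min (3*f3) (5*f5)) (7*f7) ≤ 7*f7 := min_le_right _ _
        _ ≤ 3 * u[a3]'lt3 := by omega
    · by_cases d5 : (5:ℤ) ∣ u[a3]'lt3
      · obtain ⟨w, hws, hxw⟩ := smooth_div5 (hsm _ hx3m) d5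
        have hw1 : 1 ≤ w := smooth_one_le hws
        have hnd7w : ¬ (7:ℤ) ∣ w := fun hd => d7 (hxw ▸ hd.mul_left 5)
        have hzL : 3*w ≤ L := le_trans (by omega) (mem_le_last hs hlast hx3m)
        have hzu : 3*w ∈ u := hcomp _ (smooth_mul3 hws) hzL
        have hQ : Q5 L (3*w) = true := by
          simp only [Q5, R5, Bool.and_eq_true, decide_eq_true_eq]
          constructor
          · intro hd
            rcases prime7.dvd_mul.mp hd with hh | hh
            · norm_num at hh
            · exact hnd7w hh
          · omega
        have hle := hf5min _ hzu hQ
        calc min (min (3*f3) (5*f5)) (7*f7) ≤ 5*f5 :=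
              le_trans (min_le_left _ _) (min_le_right _ _)
          _ ≤ 3 * u[a3]'lt3 := by omega
      · have hQ : Q3 L (u[a3]'lt3) = true := by
          simp only [Q3, R3, Bool.and_eq_true, decide_eq_true_eq]
          exact ⟨⟨d5, d7⟩, hi3⟩
        have hle := hf3min _ hx3m hQ
        calc min (min (3*f3) (5*f5)) (7*f7) ≤ 3*f3 :=
              le_trans (min_le_left _ _) (min_le_left _ _)
          _ ≤ 3 * u[a3]'lt3 := by omega
  have hA5 : min (min (3*f3) (5*f5)) (7*f7) ≤ 5 * u[a5]'lt5 := by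
    by_cases d7 : (7:ℤ) ∣ u[a5]'lt5
    · obtain ⟨w, hws, hxw⟩ := smooth_div7 (hsm _ hx5m) d7
      have hw1 : 1 ≤ w := smooth_one_le hws
      have hzL : 5*w ≤ L := le_trans (by omega) (mem_le_last hs hlast hx5m)
      have hzu : 5*w ∈ u := hcomp _ (smooth_mul5 hws) hzL
      have hQ : Q7 L (5*w) = true := by
        simp only [Q7, R7, Bool.true_and, decide_eq_true_eq]; omega
      have hle := hf7min _ hzu hQ
      calc min (min (3*f3) (5*f5)) (7*f7) ≤ 7*f7 := min_le_right _ _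
        _ ≤ 5 * u[a5]'lt5 := by omega
    · have hQ : Q5 L (u[a5]'lt5) = true := by
        simp only [Q5, R5, Bool.and_eq_true, decide_eq_true_eq]
        exact ⟨d7, hi5⟩
      have hle := hf5min _ hx5m hQ
      calc min (min (3*f3) (5*f5)) (7*f7) ≤ 5*f5 :=
            le_trans (min_le_left _ _) (min_le_right _ _)
        _ ≤ 5 * u[a5]'lt5 := by omega
  have hA7 : min (min (3*f3) (5*f5)) (7*f7) ≤ 7 * u[a7]'lt7 := by
    calc min (min (3*f3) (5*f5)) (7*f7) ≤ 7*f7 := min_le_right _ _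
      _ ≤ 7 * u[a7]'lt7 := by omega
  have hmAB : min (min (3*f3) (5*f5)) (7*f7) = m :=
    le_antisymm (le_min (le_min hA3 hA5) hA7) (le_min (le_min hmf3 hmf5) hmf7)
  have hatt : m = 3*f3 ∨ m = 5*f5 ∨ m = 7*f7 := by
    rw [← hmAB]
    rcases min_choice (min (3*f3) (5*f5)) (7*f7) with h | h
    · rcases min_choice (3*f3) (5*f5) with h' | h'
      · left; rw [h, h']
      · right; left; rw [h, h']
    · right; right; exact h
  -- divisibility flags of the three heads
  have nd5f3 : ¬ (5:ℤ) ∣ 3*f3 := by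
    intro hd
    rcases prime5.dvd_mul.mp hd with hh | hh
    · norm_num at hh
    · exact hf3Q.1.1 hh
  have nd7f3 : ¬ (7:ℤ) ∣ 3*f3 := by
    intro hd
    rcases prime7.dvd_mul.mp hd with hh | hh
    · norm_num at hh
    · exact hf3Q.1.2 hh
  have d5f5 : (5:ℤ) ∣ 5*f5 := dvd_mul_right 5 f5
  have nd7f5 : ¬ (7:ℤ) ∣ 5*f5 := by
    intro hd
    rcases prime7.dvd_mul.mp hd with hh | hh
    · norm_num at hh
    · exact hf5Q.1 hh
  have d7f7 : (7:ℤ) ∣ 7*f7 := dvd_mul_right 7 f7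
  have hsmm : Smooth m := by
    rcases hatt with hc | hc | hc <;> rw [hc]
    · exact smooth_mul3 (hsm _ hf3u)
    · exact smooth_mul5 (hsm _ hf5u)
    · exact smooth_mul7 (hsm _ hf7u)
  -- new pointers
  set b3 : ℕ := if 3 * u[a3]'lt3 = m then a3 + 1 else a3 with hb3
  set b5 : ℕ := if 5 * u[a5]'lt5 = m then a5 + 1 else a5 with hb5
  set b7 : ℕ := if 7 * u[a7]'lt7 = m then a7 + 1 else a7 with hb7
  obtain ⟨blt3, blo3, bhi3⟩ := ptr_step u L m 3 a3 hs (by norm_num) lt3 lo3 hLm hm1 hm3 b3 hb3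
  obtain ⟨blt5, blo5, bhi5⟩ := ptr_step u L m 5 a5 hs (by norm_num) lt5 lo5 hLm hm1 hm5 b5 hb5
  obtain ⟨blt7, blo7, bhi7⟩ := ptr_step u L m 7 a7 hs (by norm_num) lt7 lo7 hLm hm1 hm7 b7 hb7
  -- evaluate B's step
  have e3 : PySem.List.pyGetD u ((a3 : ℕ) : Int) 0 = u[a3]'lt3 := by
    rw [PySem.List.pyGetD_natCast]
    simp [List.getD_eq_getElem?_getD, List.getElem?_eq_getElem lt3]
  have e5 : PySem.List.pyGetD u ((a5 : ℕ) : Int) 0 = u[a5]'lt5 := by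
    rw [PySem.List.pyGetD_natCast]
    simp [List.getD_eq_getElem?_getD, List.getElem?_eq_getElem lt5]
  have e7 : PySem.List.pyGetD u ((a7 : ℕ) : Int) 0 = u[a7]'lt7 := by
    rw [PySem.List.pyGetD_natCast]
    simp [List.getD_eq_getElem?_getD, List.getElem?_eq_getElem lt7]
  have hstepB : stepB (u, (a3 : Int), (a5 : Int), (a7 : Int)) =
      (u ++ [m], (b3 : Int), (b5 : Int), (b7 : Int)) := by
    simp only [stepB, e3, e5, e7, ← hmdef]
    refine congrArg (Prod.mk (u ++ [m])) ?_
    refine congrArg₂ Prod.mk ?_ (congrArg₂ Prod.mk ?_ ?_)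
    · rw [hb3]; split_ifs <;> push_cast <;> ring
    · rw [hb5]; split_ifs <;> push_cast <;> ring
    · rw [hb7]; split_ifs <;> push_cast <;> ring
  -- the queues in cons form
  have hq3c : q3 = (3*f3) :: r3.map (3 * ·) := by rw [hq3, hF3]; simp
  have hq5c : q5 = (5*f5) :: r5.map (5 * ·) := by rw [hq5, hF5]; simp
  have hq7c : q7 = (7*f7) :: r7.map (7 * ·) := by rw [hq7, hF7]; simp
  -- the updated queues, by queue_step
  have qs3 := queue_step hs (show (0:ℤ) < 3 by norm_num) hLm R3 (by simpa [Q3] using hF3) hmf3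
  have qs5 := queue_step hs (show (0:ℤ) < 5 by norm_num) hLm R5 (by simpa [Q5] using hF5) hmf5
  have qs7 := queue_step hs (show (0:ℤ) < 7 by norm_num) hLm R7 (by simpa [Q7] using hF7) hmf7
  have qs3' : (u ++ [m]).filter (Q3 m) =
      (if 3*f3 = m then r3 else u.filter (Q3 L)) ++
      (if R3 m && decide (m < 3*m) then [m] else []) := qs3
  have qs5' : (u ++ [m]).filter (Q5 m) =
      (if 5*f5 = m then r5 else u.filter (Q5 L)) ++
      (if R5 m && decide (m < 5*m) then [m] else []) := qs5
  have qs7' : (u ++ [m]).filter (Q7 m) =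
      (if 7*f7 = m then r7 else u.filter (Q7 L)) ++
      (if R7 m && decide (m < 7*m) then [m] else []) := qs7
  have hm3m : m < 3 * m := by omega
  have hm5m : m < 5 * m := by omega
  have hm7m : m < 7 * m := by omega
  -- evaluate A's step in each of the three (mutually exclusive) cases
  have hstepA : ∃ A3 A5 A7, stepA (q3, q5, q7) = ((A3, A5, A7), m) ∧
      A3 = ((u ++ [m]).filter (Q3 m)).map (3 * ·) ∧
      A5 = ((u ++ [m]).filter (Q5 m)).map (5 * ·) ∧
      A7 = ((u ++ [m]).filter (Q7 m)).map (7 * ·) := by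
    rcases hatt with hc | hc | hc
    · -- m comes from the 3-queue
      have hd5m : ¬ (5:ℤ) ∣ m := by rw [hc]; exact nd5f3
      have hd7m : ¬ (7:ℤ) ∣ m := by rw [hc]; exact nd7f3
      have hnm5 : ¬ (5*f5 = m) := by
        intro hh; rw [hc] at hh; exact nd5f3 (hh ▸ d5f5)
      have hnm7 : ¬ (7*f7 = m) := by
        intro hh; rw [hc] at hh; exact nd7f3 (hh ▸ d7f7)
      have hcond3 : (R3 m && decide (m < 3*m)) = true := by
        simp only [R3, Bool.and_eq_true, decide_eq_true_eq]
        exact ⟨⟨hd5m, hd7m⟩, hm3m⟩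
      have hcond5 : (R5 m && decide (m < 5*m)) = true := by
        simp only [R5, Bool.and_eq_true, decide_eq_true_eq]
        exact ⟨hd7m, hm5m⟩
      have hcond7 : (R7 m && decide (m < 7*m)) = true := by
        simp [R7, hm7m]
      refine ⟨r3.map (3 * ·) ++ [m*3], q5 ++ [m*5], q7 ++ [m*7], ?_, ?_, ?_, ?_⟩
      · rw [hq3c, hq5c, hq7c]
        simp only [stepA, List.headD_cons, hmAB]
        rw [if_pos hc.symm]
        simp only [List.drop_succ_cons, List.drop_zero, List.headD_cons, List.cons_append,
          if_neg hnm5, if_neg hnm7]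
      · rw [qs3', if_pos hc.symm, if_pos hcond3]
        simp [mul_comm]
      · rw [qs5', if_neg hnm5, if_pos hcond5, hq5]
        simp [mul_comm]
      · rw [qs7', if_neg hnm7, if_pos hcond7, hq7]
        simp [mul_comm]
    · -- m comes from the 5-queue
      have hd5m : (5:ℤ) ∣ m := by rw [hc]; exact d5f5
      have hd7m : ¬ (7:ℤ) ∣ m := by rw [hc]; exact nd7f5
      have hnm3 : ¬ (3*f3 = m) := by
        intro hh; rw [hc] at hh; exact nd5f3 (hh.symm ▸ d5f5)
      have hnm7 : ¬ (7*f7 = m) := by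
        intro hh; rw [hc] at hh; exact nd7f5 (hh ▸ d7f7)
      have hcond3 : ¬ ((R3 m && decide (m < 3*m)) = true) := by
        simp only [R3, Bool.and_eq_true, decide_eq_true_eq]
        intro hh; exact hh.1.1 hd5m
      have hcond5 : (R5 m && decide (m < 5*m)) = true := by
        simp only [R5, Bool.and_eq_true, decide_eq_true_eq]
        exact ⟨hd7m, hm5m⟩
      have hcond7 : (R7 m && decide (m < 7*m)) = true := by
        simp [R7, hm7m]
      refine ⟨q3, r5.map (5 * ·) ++ [m*5], q7 ++ [m*7], ?_, ?_, ?_, ?_⟩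
      · rw [hq3c, hq5c, hq7c]
        simp only [stepA, List.headD_cons, hmAB]
        rw [if_neg hnm3]
        simp [hc.symm, hnm7]
      · rw [qs3', if_neg hnm3, if_neg hcond3, hq3]
        simp
      · rw [qs5', if_pos hc.symm, if_pos hcond5]
        simp [mul_comm]
      · rw [qs7', if_neg hnm7, if_pos hcond7, hq7]
        simp [mul_comm]
    · -- m comes from the 7-queue
      have hd7m : (7:ℤ) ∣ m := by rw [hc]; exact d7f7
      have hnm3 : ¬ (3*f3 = m) := by
        intro hh; rw [hc] at hh; exact nd7f3 (hh.symm ▸ d7f7)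
      have hnm5 : ¬ (5*f5 = m) := by
        intro hh; rw [hc] at hh; exact nd7f5 (hh.symm ▸ d7f7)
      have hcond3 : ¬ ((R3 m && decide (m < 3*m)) = true) := by
        simp only [R3, Bool.and_eq_true, decide_eq_true_eq]
        intro hh; exact hh.1.2 hd7m
      have hcond5 : ¬ ((R5 m && decide (m < 5*m)) = true) := by
        simp only [R5, Bool.and_eq_true, decide_eq_true_eq]
        intro hh; exact hh.1 hd7m
      have hcond7 : (R7 m && decide (m < 7*m)) = true := by
        simp [R7, hm7m]
      refine ⟨q3, q5, r7.map (7 * ·) ++ [m*7], ?_, ?_, ?_, ?_⟩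
      · rw [hq3c, hq5c, hq7c]
        simp only [stepA, List.headD_cons, hmAB]
        rw [if_neg hnm3]
        simp [hnm5, hc.symm]
      · rw [qs3', if_neg hnm3, if_neg hcond3, hq3]
        simp
      · rw [qs5', if_neg hnm5, if_neg hcond5, hq5]
        simp
      · rw [qs7', if_pos hc.symm, if_pos hcond7]
        simp [mul_comm]
  obtain ⟨A3, A5, A7, hAeq, hA3, hA5, hA7⟩ := hstepA
  refine ⟨m, b3, b5, b7, A3, A5, A7, hstepB, hAeq, ?_⟩
  refine ⟨?_, ?_, ?_, ?_, ?_, blt3, blt5, blt7, blo3, blo5, blo7,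
    bhi3 blt3, bhi5 blt5, bhi7 blt7, hA3, hA5, hA7⟩
  · rw [List.pairwise_append]
    refine ⟨hs, by simp, fun y hy z hz => ?_⟩
    simp only [List.mem_singleton] at hz
    subst hz
    exact lt_of_le_of_lt (mem_le_last hs hlast hy) hLm
  · exact List.mem_append_left _ h1m
  · intro y hy
    rcases List.mem_append.mp hy with hh | hh
    · exact hsm y hh
    · simp only [List.mem_singleton] at hh; subst hh; exact hsmm
  · exact List.getLast?_concat
  · intro x hxs hxm
    by_cases hxL : x ≤ L
    · exact List.mem_append_left _ (hcomp x hxs hxL)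
    · push Not at hxL
      have hx1 : x ≠ 1 := by omega
      rcases smooth_factor hxs hx1 with ⟨y, hys, hcx | hcx | hcx⟩
      · have := no_smooth_between hs hlast hcomp (show (0:ℤ) < 3 by norm_num) lt3 lo3 hm3 hys hcx hxL hxm
        rw [this]; exact List.mem_append_right _ (by simp)
      · have := no_smooth_between hs hlast hcomp (show (0:ℤ) < 5 by norm_num) lt5 lo5 hm5 hys hcx hxL hxm
        rw [this]; exact List.mem_append_right _ (by simp)
      · have := no_smooth_between hs hlast hcomp (show (0:ℤ) < 7 by norm_num) lt7 lo7 hm7 hys hcx hxL hxm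
        rw [this]; exact List.mem_append_right _ (by simp)

theorem run_bisim (n : ℕ) : ∀ (u : List Int) (L : Int) (a3 a5 a7 : ℕ) (q3 q5 q7 : List Int) (c : Int),
    SInv u L a3 a5 a7 q3 q5 q7 →
    ∃ (u' : List Int) (L' : Int) (b3 b5 b7 : ℕ) (r3 r5 r7 : List Int),
      loopB (n + 1) (u, (a3 : Int), (a5 : Int), (a7 : Int)) = (u', (b3 : Int), (b5 : Int), (b7 : Int)) ∧
      loopA (n + 1) (q3, q5, q7) c = L' ∧
      SInv u' L' b3 b5 b7 r3 r5 r7 := by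
  induction n with
  | zero =>
    intro u L a3 a5 a7 q3 q5 q7 c h
    obtain ⟨m, b3, b5, b7, r3, r5, r7, hB, hA, hI⟩ := step_bisim u L a3 a5 a7 q3 q5 q7 h
    exact ⟨u ++ [m], m, b3, b5, b7, r3, r5, r7, by simp [loopB, hB], by simp [loopA, hA], hI⟩
  | succ n ih =>
    intro u L a3 a5 a7 q3 q5 q7 c h
    obtain ⟨m, b3, b5, b7, r3, r5, r7, hB, hA, hI⟩ := step_bisim u L a3 a5 a7 q3 q5 q7 h
    obtain ⟨u', L', b3', b5', b7', r3', r5', r7', hB', hA', hI'⟩ :=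
      ih (u ++ [m]) m b3 b5 b7 r3 r5 r7 m hI
    refine ⟨u', L', b3', b5', b7', r3', r5', r7', ?_, ?_, hI'⟩
    · simpa [loopB, hB] using hB'
    · simpa [loopA, hA] using hA'

theorem init_inv : SInv [1] 1 0 0 0 [3] [5] [7] := by
  refine ⟨?_, ?_, ?_, ?_, ?_, ?_, ?_, ?_, ?_, ?_, ?_, ?_, ?_, ?_, ?_, ?_, ?_⟩
  · simp
  · simp
  · intro y hy; simp at hy; subst hy; exact ⟨0, 0, 0, by norm_num⟩
  · simp
  · intro x hs hle
    have := smooth_one_le hs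
    have : x = 1 := le_antisymm hle this
    simp [this]
  · simp
  · simp
  · simp
  · intro j hj hj'; omega
  · intro j hj hj'; omega
  · intro j hj hj'; omega
  · decide
  · decide
  · decide
  · simp [Q3, R3]
  · simp [Q5, R5]
  · simp [Q7, R7]

-- ===== VERDICT (by name: the statement is the Claim_ definition above) =====
theorem kthmultiple_spec : Claim_equal_kthmultiple := by
  intro k _ hk
  unfold Spec_kthmultiple kthmultiple kthmultiple_alt
  by_cases h0 : k = 0
  · subst h0; decide
  · have hpos : 0 < k := lt_of_le_of_ne hk (Ne.symm h0)
    obtain ⟨n, hn⟩ : ∃ n : ℕ, k.toNat = n + 1 := ⟨k.toNat - 1, by omega⟩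
    obtain ⟨u', L', b3, b5, b7, r3, r5, r7, hB, hA, hI⟩ :=
      run_bisim n [1] 1 0 0 0 [3] [5] [7] 0 init_inv
    have hne : u' ≠ [] := by
      intro hnil; rw [hnil] at hI; exact (by simp : ((1:Int) ∈ ([]:List Int)) → False) hI.one_mem
    rw [if_neg h0, hn]
    have hB' : loopB (n + 1) ([1], 0, 0, 0) = (u', (b3 : Int), (b5 : Int), (b7 : Int)) := by
      simpa using hB
    rw [hB', hA]
    have hlast : u'.getLast hne = L' := by
      have := hI.last
      rw [List.getLast?_eq_some_getLast hne] at this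
      exact Option.some_injective _ this
    rw [PySem.List.pyGetD_neg_one u' 0 hne, hlast]
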